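-- pv_equiv track=rewrite | github.com/dgoldsb/advent-of-code-2019 | day_24.py | score_state
-- ===== SOURCE A (Python) =====
-- def score_state(matrix):
--     power = 0
--     score = 0
--
--     len_m = len(matrix)
--     len_n = len(matrix[0])
--
--     for m in range(len_m):
--         for n in range(len_n):
--             if matrix[m][n] == "#":
--                 score += 2 ** power
--
--             power += 1
--
--     return score
-- ===== SOURCE B (Python) =====
-- def score_state(matrix):
--     cols = len(matrix[0])
--     score = 0
--     for row in reversed(matrix):
--         for n in reversed(range(cols)):
--             score = score * 2 + (row[n] == "#")
--     return score
-- ===== Notes on version B (the rewrite author's own statement) =====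
-- stated objective: simpler
-- what changed: B traverses the grid back-to-front and accumulates the score by Horner's rule (score = score*2 + bit), eliminating A's power counter and the per-cell 2**power exponentiations.
import Mathlib
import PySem

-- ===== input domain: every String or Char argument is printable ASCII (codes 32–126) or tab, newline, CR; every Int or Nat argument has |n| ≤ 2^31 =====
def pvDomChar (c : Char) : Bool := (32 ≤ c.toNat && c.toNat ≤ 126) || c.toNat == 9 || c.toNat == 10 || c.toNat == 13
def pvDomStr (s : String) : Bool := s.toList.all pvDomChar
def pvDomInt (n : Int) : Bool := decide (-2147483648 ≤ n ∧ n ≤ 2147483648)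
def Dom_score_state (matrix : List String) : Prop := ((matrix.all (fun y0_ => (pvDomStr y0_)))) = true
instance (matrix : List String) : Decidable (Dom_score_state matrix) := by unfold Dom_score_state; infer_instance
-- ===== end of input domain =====

-- B scores the grid back-to-front by Horner's rule (score*2 + bit), replacing A's power counter and per-cell 2**power sums; same O(m*n) cost.


-- ===== PORT A =====
def score_state (matrix : List String) : Int :=
  let len_m : Int := (matrix.length : Int)
  -- len(matrix[0]) raises IndexError on an empty matrix; excluded by Pre_, default never used inside Pre_
  let len_n : Int := ((PySem.List.pyGet? matrix 0).map (fun r => PySem.Str.len r)).getD 0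
  ((PySem.List.pyRange 0 len_m 1).foldl (fun (st : Int × Int) m =>
    (PySem.List.pyRange 0 len_n 1).foldl (fun (st : Int × Int) n =>
      let st' := if (PySem.List.pyGet? matrix m).bind (fun r => PySem.Str.pyGet? r n) = some '#'
                 then (st.1, st.2 + 2 ^ st.1.toNat) else st
      (st'.1 + 1, st'.2)) st) (0, 0)).2

-- ===== PORT B =====
def score_state_alt (matrix : List String) : Int :=
  let cols : Int := ((PySem.List.pyGet? matrix 0).map (fun r => PySem.Str.len r)).getD 0
  matrix.reverse.foldl (fun (score : Int) row =>
    (PySem.List.pyRange 0 cols 1).reverse.foldl (fun (score : Int) n =>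
      score * 2 + (if PySem.Str.pyGet? row n = some '#' then 1 else 0)) score) 0

-- ===== PRECONDITION & SPEC =====
-- Pre_ excludes exactly the inputs where Python A raises IndexError: the empty matrix
-- (len(matrix[0])) and matrices with a row shorter than the first row (matrix[m][n]).
def Pre_score_state (matrix : List String) : Prop :=
  matrix ≠ [] ∧ ∀ r ∈ matrix, PySem.Str.len (matrix.headD "") ≤ PySem.Str.len r
instance (matrix : List String) : Decidable (Pre_score_state matrix) := by
  unfold Pre_score_state; infer_instance
def pvWitness_score_state : List String := ["#.", ".#"]

def Spec_score_state (matrix : List String) (out : Int) : Prop := out = score_state_alt matrix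
instance (matrix : List String) (out : Int) : Decidable (Spec_score_state matrix out) := by unfold Spec_score_state; infer_instance

-- ===== CLAIM (what is proved, stated in full; the proofs are below) =====
def Claim_equal_score_state : Prop := ∀ (matrix : List String), Dom_score_state matrix → Pre_score_state matrix → Spec_score_state matrix (score_state matrix)

-- ===== LEMMAS AND PROOFS =====

-- the bit of one cell
def pvBit (row : String) (n : Int) : Int :=
  if PySem.Str.pyGet? row n = some '#' then 1 else 0

-- the grid's bits, row-major, first cell first
def pvBits (matrix : List String) (cols : Int) : List Int :=
  matrix.flatMap (fun row => (PySem.List.pyRange 0 cols 1).map (fun n => pvBit row n))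

-- binary value with the FIRST bit least significant
def pvVal (L : List Int) : Int := L.foldr (fun b a => a * 2 + b) 0

theorem pvA_fold (L : List Int) (p s : Int) (hp : 0 ≤ p) :
    L.foldl (fun (st : Int × Int) b => (st.1 + 1, st.2 + b * 2 ^ st.1.toNat)) (p, s)
      = (p + L.length, s + 2 ^ p.toNat * pvVal L) := by
  induction L generalizing p s with
  | nil => simp [pvVal]
  | cons b L ih =>
    simp only [List.foldl_cons, List.length_cons, pvVal, List.foldr_cons]
    rw [ih (p + 1) _ (by omega)]
    have h2 : (p + 1).toNat = p.toNat + 1 := by omega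
    simp only [Prod.mk.injEq]
    refine ⟨by push_cast; ring, ?_⟩
    rw [h2, pow_succ]; unfold pvVal; ring

theorem pv_map_pyGet?_range {β : Type} (xs : List String) (h : Option String → β) :
    (PySem.List.pyRange 0 (xs.length : Int) 1).map (fun m => h (PySem.List.pyGet? xs m))
      = xs.map (fun x => h (some x)) := by
  rw [PySem.List.pyRange_one]
  simp only [List.map_map]
  apply List.ext_getElem
  · simp
  · intro i h1 h2
    simp only [List.length_map] at h2
    simp only [List.getElem_map, List.getElem_range, Function.comp_apply]
    have : PySem.List.pyGet? xs ((0 : Int) + (i : Int)) = some xs[i] := by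
      rw [zero_add, PySem.List.pyGet?_natCast, List.getElem?_eq_getElem h2]
    rw [this]

theorem pvA_eq_val (matrix : List String) (cols : Int) :
    ((PySem.List.pyRange 0 (matrix.length : Int) 1).foldl (fun (st : Int × Int) m =>
      (PySem.List.pyRange 0 cols 1).foldl (fun (st : Int × Int) n =>
        let st' := if (PySem.List.pyGet? matrix m).bind (fun r => PySem.Str.pyGet? r n) = some '#'
                   then (st.1, st.2 + 2 ^ st.1.toNat) else st
        (st'.1 + 1, st'.2)) st) (0, 0)).2 = pvVal (pvBits matrix cols) := by
  -- rewrite A's per-cell step into the pvBit form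
  have hstep : ∀ (st : Int × Int) (o : Option String) (n : Int),
      (let st' := if o.bind (fun r => PySem.Str.pyGet? r n) = some '#'
                  then (st.1, st.2 + 2 ^ st.1.toNat) else st
       ((st'.1 + 1, st'.2) : Int × Int))
      = (st.1 + 1, st.2 + (if (o.bind (fun r => PySem.Str.pyGet? r n)) = some '#' then (1:Int) else 0) * 2 ^ st.1.toNat) := by
    intro st o n
    by_cases h : o.bind (fun r => PySem.Str.pyGet? r n) = some '#'
    · simp only [if_pos h]; simp
    · simp only [if_neg h]; simp
  -- turn the nested index fold into a fold over the flattened bit list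
  have key : ∀ (ms : List Int) (p s : Int), 0 ≤ p →
      (∀ m ∈ ms, ∃ row, PySem.List.pyGet? matrix m = some row) →
      (ms.foldl (fun (st : Int × Int) m =>
        (PySem.List.pyRange 0 cols 1).foldl (fun (st : Int × Int) n =>
          let st' := if (PySem.List.pyGet? matrix m).bind (fun r => PySem.Str.pyGet? r n) = some '#'
                     then (st.1, st.2 + 2 ^ st.1.toNat) else st
          (st'.1 + 1, st'.2)) st) (p, s))
      = (p + ms.length * (cols - 0).toNat, s + 2 ^ p.toNat *
          pvVal (ms.flatMap (fun m => (PySem.List.pyRange 0 cols 1).map (fun n =>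
            if (PySem.List.pyGet? matrix m).bind (fun r => PySem.Str.pyGet? r n) = some '#' then (1:Int) else 0)))) := by
    intro ms
    induction ms with
    | nil => intro p s hp _; simp [pvVal]
    | cons m ms ih =>
      intro p s hp hmem
      simp only [List.foldl_cons]
      have hinner : (PySem.List.pyRange 0 cols 1).foldl (fun (st : Int × Int) n =>
          let st' := if (PySem.List.pyGet? matrix m).bind (fun r => PySem.Str.pyGet? r n) = some '#'
                     then (st.1, st.2 + 2 ^ st.1.toNat) else st
          (st'.1 + 1, st'.2)) (p, s)
          = (p + ((PySem.List.pyRange 0 cols 1).map (fun n =>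
              if (PySem.List.pyGet? matrix m).bind (fun r => PySem.Str.pyGet? r n) = some '#' then (1:Int) else 0)).length,
             s + 2 ^ p.toNat * pvVal ((PySem.List.pyRange 0 cols 1).map (fun n =>
              if (PySem.List.pyGet? matrix m).bind (fun r => PySem.Str.pyGet? r n) = some '#' then (1:Int) else 0))) := by
        rw [List.foldl_ext _ (fun (st : Int × Int) n =>
              (st.1 + 1, st.2 + (if (PySem.List.pyGet? matrix m).bind (fun r => PySem.Str.pyGet? r n) = some '#' then (1:Int) else 0) * 2 ^ st.1.toNat))
            (p, s) (fun st n _ => hstep st (PySem.List.pyGet? matrix m) n),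
          ← List.foldl_map (f := fun n => if (PySem.List.pyGet? matrix m).bind (fun r => PySem.Str.pyGet? r n) = some '#' then (1:Int) else 0)
            (g := fun (st : Int × Int) b => (st.1 + 1, st.2 + b * 2 ^ st.1.toNat))]
        exact pvA_fold _ p s hp
      rw [hinner]
      rw [ih _ _ (by positivity) (fun m hm => hmem m (List.mem_cons_of_mem _ hm))]
      simp only [List.length_map, PySem.List.length_pyRange_one, List.flatMap_cons, pvVal,
        List.foldr_append]
      simp only [Prod.mk.injEq]
      refine ⟨by push_cast [List.length_cons]; ring, ?_⟩
      · have hlen : ((PySem.List.pyRange 0 cols 1).map (fun n =>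
            if (PySem.List.pyGet? matrix m).bind (fun r => PySem.Str.pyGet? r n) = some '#' then (1:Int) else 0)).length = (cols - 0).toNat := by
          simp [PySem.List.length_pyRange_one]
        -- foldr over L ++ rest splits; value of prefix with seed v
        have hsplit : ∀ (L : List Int) (v : Int),
            L.foldr (fun b a => a * 2 + b) v = v * 2 ^ L.length + pvVal L := by
          intro L
          induction L with
          | nil => intro v; simp [pvVal]
          | cons b L ihL =>
            intro v
            simp only [List.foldr_cons, List.length_cons, pvVal] at *
            rw [ihL v]; rw [pow_succ]; ring
        rw [hsplit, hsplit]
        have hp1 : (p + ↑((cols - 0).toNat)).toNat = p.toNat + (cols - 0).toNat := by omega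
        rw [hp1, hlen, pow_add]
        rw [hsplit, hlen]
        simp only [Int.sub_zero]
        ring
  have hlen0 : ∀ m ∈ PySem.List.pyRange 0 (matrix.length : Int) 1, ∃ row, PySem.List.pyGet? matrix m = some row := by
    intro m hm
    rw [PySem.List.mem_pyRange_one] at hm
    exact ⟨_, PySem.List.pyGet?_eq_some_getElem matrix hm.1 hm.2⟩
  rw [key _ 0 0 le_rfl hlen0]
  simp only [Int.toNat_zero, pow_zero, one_mul, zero_add]
  congr 1
  unfold pvBits
  rw [List.flatMap_def, List.flatMap_def]
  congr 1
  rw [pv_map_pyGet?_range matrix (fun o => (PySem.List.pyRange 0 cols 1).map (fun n =>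
    if o.bind (fun r => PySem.Str.pyGet? r n) = some '#' then (1:Int) else 0))]
  simp [pvBit]

theorem pvB_eq_val (matrix : List String) (cols : Int) :
    matrix.reverse.foldl (fun (score : Int) row =>
      (PySem.List.pyRange 0 cols 1).reverse.foldl (fun (score : Int) n =>
        score * 2 + (if PySem.Str.pyGet? row n = some '#' then 1 else 0)) score) 0
      = pvVal (pvBits matrix cols) := by
  rw [List.foldl_reverse]
  unfold pvBits pvVal
  induction matrix with
  | nil => simp
  | cons row rest ih =>
    simp only [List.foldr_cons, List.flatMap_cons, List.foldr_append]
    rw [ih, List.foldl_reverse, List.foldr_map]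
    simp only [pvBit]

-- ===== VERDICT (by name: the statement is the Claim_ definition above) =====
theorem score_state_spec : Claim_equal_score_state := by
  intro matrix _ _
  unfold Spec_score_state score_state score_state_alt
  rw [pvA_eq_val, pvB_eq_val]
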